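-- pv_equiv track=rewrite | github.com/shodenis/hermes-agent | gateway/platforms/email.py | _is_automated_sender
-- ===== SOURCE A (Python) =====
-- _NOREPLY_PATTERNS = (
--     "noreply", "no-reply", "no_reply", "donotreply", "do-not-reply",
--     "mailer-daemon", "postmaster", "bounce", "notifications@",
--     "automated@", "auto-confirm", "auto-reply", "automailer",
-- )
--
-- _AUTOMATED_HEADERS = {
--     "Auto-Submitted": lambda v: v.lower() != "no",
--     "Precedence": lambda v: v.lower() in ("bulk", "list", "junk"),
--     "X-Auto-Response-Suppress": lambda v: bool(v),
--     "List-Unsubscribe": lambda v: bool(v),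
-- }
--
-- def _is_automated_sender(address: str, headers: dict) -> bool:
--     """Return True if this email is from an automated/noreply source."""
--     addr = address.lower()
--     if any(pattern in addr for pattern in _NOREPLY_PATTERNS):
--         return True
--     for header, check in _AUTOMATED_HEADERS.items():
--         value = headers.get(header, "")
--         if value and check(value):
--             return True
--     return False
-- ===== SOURCE B (Python) =====
-- _NOREPLY_PATTERNS = (
--     "noreply", "no-reply", "no_reply", "donotreply", "do-not-reply",
--     "mailer-daemon", "postmaster", "bounce", "notifications@",
--     "automated@", "auto-confirm", "auto-reply", "automailer",
-- )
--
--
-- def _is_automated_sender(address: str, headers: dict) -> bool: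
--     """Return True if this email is from an automated/noreply source."""
--     addr = address.lower()
--     # One left-to-right pass over the address simulating an NFA of live
--     # pattern suffixes (multi-pattern matching without re-scanning):
--     # `active` holds the still-unmatched tails of every partially matched
--     # pattern; each character advances all of them and starts fresh ones.
--     active = []
--     for ch in addr:
--         nxt = []
--         for p in active + list(_NOREPLY_PATTERNS):
--             if p[0] == ch:
--                 rest = p[1:]
--                 if not rest:
--                     return True  # some pattern fully matched
--                 nxt.append(rest)
--         active = nxt
--     # header signals, same fixed order, explicit short-circuit chain
--     auto = headers.get("Auto-Submitted", "")
--     if auto and auto.lower() != "no":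
--         return True
--     prec = headers.get("Precedence", "").lower()
--     if prec == "bulk" or prec == "list" or prec == "junk":
--         return True
--     return bool(headers.get("X-Auto-Response-Suppress", "")) or bool(headers.get("List-Unsubscribe", ""))
-- ===== Notes on version B (the rewrite author's own statement) =====
-- stated objective: alternative
-- what changed: substring detection is replaced by a single left-to-right pass over the address that simulates an NFA of live pattern suffixes (simultaneous multi-pattern matching with an explicit state set, no repeated substring scans), and the predicate-table header loop by an explicit short-circuit boolean chain
import Mathlib
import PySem

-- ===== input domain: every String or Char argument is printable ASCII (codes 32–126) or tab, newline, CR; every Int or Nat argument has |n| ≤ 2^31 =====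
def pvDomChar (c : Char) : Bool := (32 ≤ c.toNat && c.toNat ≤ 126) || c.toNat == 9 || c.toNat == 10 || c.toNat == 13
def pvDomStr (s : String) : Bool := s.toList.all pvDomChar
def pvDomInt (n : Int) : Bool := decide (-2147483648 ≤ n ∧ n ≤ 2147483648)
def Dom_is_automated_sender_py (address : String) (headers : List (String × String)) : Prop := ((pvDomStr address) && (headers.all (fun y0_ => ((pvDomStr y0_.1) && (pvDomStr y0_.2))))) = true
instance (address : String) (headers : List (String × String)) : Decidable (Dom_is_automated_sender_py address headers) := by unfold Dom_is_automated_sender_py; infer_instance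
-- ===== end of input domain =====

-- B replaces A's pattern-major 'p in addr' substring scans by ONE left-to-right pass over the
-- address that simulates an NFA of live pattern suffixes (simultaneous multi-pattern matching
-- with an explicit state set), and A's predicate-table header loop by an explicit short-circuit
-- boolean chain; same results (objective: alternative, no speed claim).

-- ===== PORT A =====
def pvPatterns : List (List Char) :=
  ["noreply".toList, "no-reply".toList, "no_reply".toList, "donotreply".toList,
   "do-not-reply".toList, "mailer-daemon".toList, "postmaster".toList, "bounce".toList,
   "notifications@".toList, "automated@".toList, "auto-confirm".toList, "auto-reply".toList,
   "automailer".toList]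

-- _AUTOMATED_HEADERS: the dict of header-name → predicate, in insertion order
def pvAutomatedHeaders : List (String × (List Char → Bool)) :=
  [("Auto-Submitted", fun v => PySem.Chars.lower v != "no".toList),
   ("Precedence", fun v => ["bulk".toList, "list".toList, "junk".toList].contains (PySem.Chars.lower v)),
   ("X-Auto-Response-Suppress", fun v => v != []),
   ("List-Unsubscribe", fun v => v != [])]

def is_automated_sender_py (address : String) (headers : List (String × String)) : Bool :=
  let addr := PySem.Chars.lower address.toList
  if pvPatterns.any (fun p => PySem.Chars.isIn p addr) then true
  else
    pvAutomatedHeaders.foldl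
      (fun acc hc =>
        if acc then acc
        else
          let value := ((PySem.Dict.mk headers).getD hc.1 "").toList
          if (value != []) && hc.2 value then true else acc)
      false

-- ===== PORT B =====
-- the inner `for p in active + patterns` loop with its early `return True`:
-- `none` = a pattern fully matched (early return), `some nxt` = the next state set.
-- States are the still-unmatched pattern tails (Python slices p[1:]); the `[] :: rest`
-- branch is unreachable (all states are nonempty), kept only for totality.
def pvStep (ch : Char) : List (List Char) → Option (List (List Char))
  | [] => some []
  | [] :: rest => pvStep ch rest
  | (c :: cs) :: rest =>
    if c == ch then
      if cs = [] then none
      else (pvStep ch rest).map (cs :: ·)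
    else pvStep ch rest

-- the outer `for ch in addr` loop, carrying the active state set
def pvScan : List Char → List (List Char) → Bool
  | [], _ => false
  | ch :: s, active =>
    match pvStep ch (active ++ pvPatterns) with
    | none => true
    | some nxt => pvScan s nxt

def is_automated_sender_py_alt (address : String) (headers : List (String × String)) : Bool :=
  let addr := PySem.Chars.lower address.toList
  if pvScan addr [] then true
  else
    let auto := ((PySem.Dict.mk headers).getD "Auto-Submitted" "").toList
    if (auto != []) && (PySem.Chars.lower auto != "no".toList) then true
    else
      let prec := PySem.Chars.lower ((PySem.Dict.mk headers).getD "Precedence" "").toList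
      if prec == "bulk".toList || prec == "list".toList || prec == "junk".toList then true
      else (((PySem.Dict.mk headers).getD "X-Auto-Response-Suppress" "").toList != []) ||
           (((PySem.Dict.mk headers).getD "List-Unsubscribe" "").toList != [])

-- ===== PRECONDITION & SPEC =====
def Spec_is_automated_sender_py (address : String) (headers : List (String × String)) (out : Bool) : Prop := out = is_automated_sender_py_alt address headers
instance (address : String) (headers : List (String × String)) (out : Bool) : Decidable (Spec_is_automated_sender_py address headers out) := by unfold Spec_is_automated_sender_py; infer_instance

-- ===== CLAIM (what is proved, stated in full; the proofs are below) =====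
def Claim_equal_is_automated_sender_py : Prop := ∀ (address : String) (headers : List (String × String)), Dom_is_automated_sender_py address headers → Spec_is_automated_sender_py address headers (is_automated_sender_py address headers)

-- ===== LEMMAS AND PROOFS =====

lemma pvPatterns_ne_nil : ∀ p ∈ pvPatterns, p ≠ [] := by decide

lemma pvStep_eq_none_iff (ch : Char) (states : List (List Char)) :
    pvStep ch states = none ↔ [ch] ∈ states := by
  induction states with
  | nil => simp [pvStep]
  | cons p rest ih =>
    match p with
    | [] => simp [pvStep, ih]
    | c :: cs =>
      simp only [pvStep, List.mem_cons]
      by_cases hc : c = ch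
      · subst hc
        by_cases hcs : cs = []
        · subst hcs; simp
        · rw [if_pos (by simp), if_neg hcs, Option.map_eq_none_iff, ih]
          constructor
          · intro h; exact Or.inr h
          · rintro (h | h)
            · cases h; exact absurd rfl hcs
            · exact h
      · rw [if_neg (by simp [hc]), ih]
        constructor
        · intro h; exact Or.inr h
        · rintro (h | h)
          · cases h; exact absurd rfl hc
          · exact h

lemma mem_pvStep_some (ch : Char) (states nxt : List (List Char))
    (h : pvStep ch states = some nxt) (cs : List Char) :
    cs ∈ nxt ↔ (ch :: cs ∈ states ∧ cs ≠ []) := by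
  induction states generalizing nxt with
  | nil =>
    simp only [pvStep, Option.some.injEq] at h
    subst h; simp
  | cons p rest ih =>
    match p with
    | [] =>
      simp only [pvStep] at h
      rw [ih nxt h]
      simp
    | c :: cs' =>
      simp only [pvStep] at h
      by_cases hc : c == ch
      · rw [if_pos hc] at h
        by_cases hcs : cs' = []
        · rw [if_pos hcs] at h; exact absurd h (by simp)
        · rw [if_neg hcs] at h
          match hrec : pvStep ch rest with
          | none => rw [hrec] at h; exact absurd h (by simp [Option.map])
          | some ns =>
            rw [hrec] at h
            simp only [Option.map, Option.some.injEq] at h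
            subst h
            have hce : c = ch := beq_iff_eq.mp hc
            subst hce
            simp only [List.mem_cons, ih ns hrec, List.cons.injEq, true_and]
            constructor
            · rintro (rfl | ⟨hm, hne⟩)
              · exact ⟨Or.inl rfl, hcs⟩
              · exact ⟨Or.inr hm, hne⟩
            · rintro ⟨(rfl | hm), hne⟩
              · exact Or.inl rfl
              · exact Or.inr ⟨hm, hne⟩
      · rw [if_neg hc] at h
        rw [ih nxt h]
        simp only [List.mem_cons, List.cons_eq_cons]
        constructor
        · rintro ⟨hm, hne⟩; exact ⟨Or.inr hm, hne⟩
        · rintro ⟨(⟨he, _⟩ | hm), hne⟩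
          · exact absurd he (fun hh => hc (by simp [hh]))
          · exact ⟨hm, hne⟩

-- the NFA pass accepts exactly when some live state is a prefix of the rest of the
-- input, or some pattern occurs at some position of the rest of the input
lemma pvScan_iff (s : List Char) (active : List (List Char))
    (hne : ∀ p ∈ active, p ≠ []) :
    pvScan s active = true ↔
      ((∃ p ∈ active, p <+: s) ∨ (∃ p ∈ pvPatterns, ∃ i < s.length, p <+: s.drop i)) := by
  induction s generalizing active with
  | nil =>
    simp only [pvScan]
    constructor
    · intro h; exact absurd h (by simp)
    · rintro (⟨p, hp, hpre⟩ | ⟨p, hp, i, hi, _⟩)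
      · exact absurd (List.prefix_nil.mp hpre) (hne p hp)
      · simp at hi
  | cons ch t ih =>
    simp only [pvScan]
    match hstep : pvStep ch (active ++ pvPatterns) with
    | none =>
      have hmem := (pvStep_eq_none_iff ch _).mp hstep
      simp only [List.mem_append] at hmem
      constructor
      · intro _
        rcases hmem with hm | hm
        · exact Or.inl ⟨[ch], hm, by simp⟩
        · exact Or.inr ⟨[ch], hm, 0, by simp⟩
      · intro _; rfl
    | some nxt =>
      have hnxt := mem_pvStep_some ch _ nxt hstep
      have hnonone : [ch] ∉ active ++ pvPatterns := by
        intro hm; rw [← pvStep_eq_none_iff ch] at hm; rw [hstep] at hm; exact absurd hm (by simp)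
      rw [ih nxt (fun p hp => ((hnxt p).mp hp).2)]
      simp only [List.mem_append] at hnonone
      push Not at hnonone
      constructor
      · rintro (⟨cs, hcs, hpre⟩ | ⟨p, hp, i, hi, hpre⟩)
        · rcases (hnxt cs).mp hcs with ⟨hm, hne'⟩
          rcases List.mem_append.mp hm with hm | hm
          · exact Or.inl ⟨ch :: cs, hm, List.cons_prefix_cons.mpr ⟨rfl, hpre⟩⟩
          · exact Or.inr ⟨ch :: cs, hm, 0, by simp, List.cons_prefix_cons.mpr ⟨rfl, hpre⟩⟩
        · exact Or.inr ⟨p, hp, i + 1, by simpa using hi, by simpa using hpre⟩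
      · rintro (⟨p, hp, hpre⟩ | ⟨p, hp, i, hi, hpre⟩)
        · match p, hpre with
          | [], _ => exact absurd rfl (hne [] hp)
          | c :: cs, hpre =>
            obtain ⟨rfl, hpre'⟩ := List.cons_prefix_cons.mp hpre
            have hcsne : cs ≠ [] := by
              rintro rfl; exact hnonone.1 hp
            exact Or.inl ⟨cs, (hnxt cs).mpr ⟨List.mem_append.mpr (Or.inl hp), hcsne⟩, hpre'⟩
        · match i, hpre with
          | 0, hpre =>
            match p, hpre with
            | [], _ => exact absurd rfl (pvPatterns_ne_nil [] hp)
            | c :: cs, hpre =>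
              obtain ⟨rfl, hpre'⟩ := List.cons_prefix_cons.mp (by simpa using hpre)
              have hcsne : cs ≠ [] := by
                rintro rfl; exact hnonone.2 hp
              exact Or.inl ⟨cs, (hnxt cs).mpr ⟨List.mem_append.mpr (Or.inr hp), hcsne⟩, hpre'⟩
          | i + 1, hpre =>
            exact Or.inr ⟨p, hp, i, by simpa using hi, by simpa using hpre⟩

-- the NFA pass from the empty state set = A's pattern-major 'p in s' scan
lemma pv_scan_eq (s : List Char) :
    pvScan s [] = pvPatterns.any (fun p => PySem.Chars.isIn p s) := by
  rw [Bool.eq_iff_iff, pvScan_iff s [] (by simp)]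
  simp only [List.any_eq_true, List.not_mem_nil, false_and, exists_const, false_or]
  constructor
  · rintro ⟨p, hp, i, _, hpre⟩
    exact ⟨p, hp, (PySem.Chars.exists_prefix_drop_iff_isIn p s).mp ⟨i, hpre⟩⟩
  · rintro ⟨p, hp, hin⟩
    obtain ⟨j, hj⟩ := (PySem.Chars.exists_prefix_drop_iff_isIn p s).mpr hin
    by_cases hlt : j < s.length
    · exact ⟨p, hp, j, hlt, hj⟩
    · rw [List.drop_eq_nil_of_le (by omega)] at hj
      exact absurd (List.prefix_nil.mp hj) (pvPatterns_ne_nil p hp)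

lemma pv_prec_eq (v : List Char) :
    ((v != []) && (["bulk".toList, "list".toList, "junk".toList].contains (PySem.Chars.lower v))) =
    (PySem.Chars.lower v == "bulk".toList || PySem.Chars.lower v == "list".toList ||
     PySem.Chars.lower v == "junk".toList) := by
  cases v with
  | nil => decide
  | cons a l =>
    simp only [List.contains_cons, List.contains_nil, Bool.or_false, bne, Bool.or_assoc]
    rfl

-- ===== VERDICT (by name: the statement is the Claim_ definition above) =====
theorem is_automated_sender_py_spec : Claim_equal_is_automated_sender_py := by
  intro address headers _
  unfold Spec_is_automated_sender_py is_automated_sender_py is_automated_sender_py_alt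
  simp only [← pv_scan_eq]
  split
  · rfl
  · simp only [pvAutomatedHeaders, List.foldl]
    rw [← pv_prec_eq]
    generalize ((((PySem.Dict.mk headers).getD "Auto-Submitted" "").toList != []) &&
        (PySem.Chars.lower ((PySem.Dict.mk headers).getD "Auto-Submitted" "").toList != "no".toList)) = c1
    generalize ((((PySem.Dict.mk headers).getD "Precedence" "").toList != []) &&
        (["bulk".toList, "list".toList, "junk".toList].contains
          (PySem.Chars.lower ((PySem.Dict.mk headers).getD "Precedence" "").toList))) = c2
    generalize (((PySem.Dict.mk headers).getD "X-Auto-Response-Suppress" "").toList != []) = c3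
    generalize (((PySem.Dict.mk headers).getD "List-Unsubscribe" "").toList != []) = c4
    cases c1 <;> cases c2 <;> cases c3 <;> cases c4 <;> simp
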